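-- pv_equiv track=rewrite | github.com/BlastWind/leetcode | odd-even-jump/make-next-greater-indices.py | calculateGreatestSmallerOrEqualToIndices
-- ===== SOURCE A (Python) =====
-- from typing import List
--
-- def calculateGreatestSmallerOrEqualToIndices(arr: List[int]):
--     indices = [-1] * len(arr)
--     # as we iterate, elements for sure are greater
--     # however, they might not have greater indices
--     stack = []
--     # Note that reverse(sorted([v, i] for i, v in enumerate(arr)) does not work, because the following happens
--     # for sorted = sorted([v, i] for i, v in enumerate(arr))= [[1, 0], [1, 1]
--     # reverse(sorted) = [[1, 1], [1, 0]], but we don't want that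
--     # Conversely, by using -, we obtain [[-1, 0], [-1, 1]], indices flow left to right, as required
--     temp = sorted([[-v, i] for i, v in enumerate(arr)])
--     for _, i in temp:
--         while len(stack) > 0 and stack[-1] < i:
--             indices[stack.pop()] = i
--         stack.append(i)
--     return indices
-- ===== SOURCE B (Python) =====
-- def calculateGreatestSmallerOrEqualToIndices(arr):
--     n = len(arr)
--     res = []
--     for k in range(n):
--         best = -1
--         for j in range(k + 1, n):
--             if arr[j] <= arr[k] and (best == -1 or arr[j] > arr[best]):
--                 best = j
--         res.append(best)
--     return res
-- ===== Notes on version B (the rewrite author's own statement) =====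
-- stated objective: simpler
-- what changed: A's sort-by-(-value,index) plus monotonic-stack sweep is replaced by a direct nested scan: for each k, pick among j>k with arr[j] <= arr[k] the index with the largest value, ties to the smallest index.
import Mathlib
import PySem

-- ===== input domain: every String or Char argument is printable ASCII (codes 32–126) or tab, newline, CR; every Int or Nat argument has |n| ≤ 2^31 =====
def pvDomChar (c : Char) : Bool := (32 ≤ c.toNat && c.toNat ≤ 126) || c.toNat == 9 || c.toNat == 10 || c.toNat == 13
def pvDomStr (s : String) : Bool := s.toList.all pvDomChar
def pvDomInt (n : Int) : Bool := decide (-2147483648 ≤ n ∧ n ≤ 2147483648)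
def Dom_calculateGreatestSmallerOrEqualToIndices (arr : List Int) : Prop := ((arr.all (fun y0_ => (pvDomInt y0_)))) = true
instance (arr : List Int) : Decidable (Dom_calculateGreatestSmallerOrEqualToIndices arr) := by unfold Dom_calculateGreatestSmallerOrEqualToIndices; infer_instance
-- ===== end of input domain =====

-- B replaces A's sort + monotonic stack by a direct quadratic scan: for each k it keeps, among the
-- later positions j with arr[j] <= arr[k], the one with the largest value (ties: smallest index).
-- Objective: simpler (no speedup claimed: A is O(n log n), B is O(n^2)).

-- ===== PORT A =====
-- inner 'while len(stack) > 0 and stack[-1] < i: indices[stack.pop()] = i'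
-- (stack represented with its top as the list head; Python appends/pops at the end)
def pvPopAssign (indices : List Int) (stack : List Int) (i : Int) : List Int × List Int :=
  match stack with
  | [] => (indices, [])
  | t :: rest =>
    if t < i then pvPopAssign (PySem.List.pySetD indices t i) rest i
    else (indices, t :: rest)

def calculateGreatestSmallerOrEqualToIndices (arr : List Int) : List Int :=
  let indices : List Int := List.replicate arr.length (-1)
  -- temp = sorted([[-v, i] for i, v in enumerate(arr)]): 2-lists compared lexicographically = pairs under (fst, snd) tuple order
  let temp := PySem.List.sorted2 ((PySem.List.enumerate arr).map (fun p => (-p.2, p.1)))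
      (fun q => q.1) (fun q => q.2)
  (temp.foldl (fun s q =>
      let r := pvPopAssign s.1 s.2 q.2
      (r.1, q.2 :: r.2)) (indices, ([] : List Int))).1

-- ===== PORT B =====
def calculateGreatestSmallerOrEqualToIndices_alt (arr : List Int) : List Int :=
  let n : Int := arr.length
  (PySem.List.pyRange 0 n 1).map (fun k =>
    (PySem.List.pyRange (k + 1) n 1).foldl (fun best j =>
      if PySem.List.pyGetD arr j 0 ≤ PySem.List.pyGetD arr k 0 ∧
          (best = -1 ∨ PySem.List.pyGetD arr best 0 < PySem.List.pyGetD arr j 0)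
        then j else best) (-1))

-- ===== PRECONDITION & SPEC =====
def Spec_calculateGreatestSmallerOrEqualToIndices (arr : List Int) (out : List Int) : Prop := out = calculateGreatestSmallerOrEqualToIndices_alt arr
instance (arr : List Int) (out : List Int) : Decidable (Spec_calculateGreatestSmallerOrEqualToIndices arr out) := by unfold Spec_calculateGreatestSmallerOrEqualToIndices; infer_instance

-- ===== CLAIM (what is proved, stated in full; the proofs are below) =====
def Claim_equal_calculateGreatestSmallerOrEqualToIndices : Prop := ∀ (arr : List Int), Dom_calculateGreatestSmallerOrEqualToIndices arr → Spec_calculateGreatestSmallerOrEqualToIndices arr (calculateGreatestSmallerOrEqualToIndices arr)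

-- ===== LEMMAS AND PROOFS =====

-- value at (nonnegative) index j
def pvAv (arr : List Int) (j : Int) : Int := arr.getD j.toNat 0

-- strict order of A's processing: a before b iff key (-arr[a], a) <lex (-arr[b], b)
def pvLt (arr : List Int) (a b : Int) : Prop :=
  pvAv arr b < pvAv arr a ∨ (pvAv arr a = pvAv arr b ∧ a < b)

-- j is a candidate target for position k
def pvCand (arr : List Int) (k j : Int) : Prop :=
  k < j ∧ j < (arr.length : Int) ∧ pvAv arr j ≤ pvAv arr k

-- v is the value both programs store at position k: -1 if no candidate, else the pvLt-least candidate
def pvIsPick (arr : List Int) (k v : Int) : Prop :=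
  (v = -1 ∧ ∀ j, ¬ pvCand arr k j) ∨
  (pvCand arr k v ∧ ∀ j, pvCand arr k j → j = v ∨ pvLt arr v j)

theorem pvLt_asymm {arr : List Int} {a b : Int} (h1 : pvLt arr a b) (h2 : pvLt arr b a) : False := by
  rcases h1 with h1 | ⟨h1, h1'⟩ <;> rcases h2 with h2 | ⟨h2, h2'⟩ <;> omega

theorem pvIsPick_unique {arr : List Int} {k v w : Int}
    (hv : pvIsPick arr k v) (hw : pvIsPick arr k w) : v = w := by
  rcases hv with ⟨hv1, hv2⟩ | ⟨hv1, hv2⟩ <;> rcases hw with ⟨hw1, hw2⟩ | ⟨hw1, hw2⟩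
  · omega
  · exact absurd hw1 (hv2 w)
  · exact absurd hv1 (hw2 v)
  · rcases hv2 w hw1 with h | h
    · omega
    · rcases hw2 v hv1 with h' | h'
      · omega
      · exact absurd h' (fun h' => pvLt_asymm h h')

theorem pvPopAssign_eq (st ind : List Int) (i : Int) :
    pvPopAssign ind st i =
      ((st.takeWhile (fun t => t < i)).foldl (fun a t => PySem.List.pySetD a t i) ind,
       st.dropWhile (fun t => t < i)) := by
  induction st generalizing ind with
  | nil => simp [pvPopAssign]
  | cons t rest ih =>
    by_cases h : t < i <;> simp [pvPopAssign, h, ih]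

theorem length_foldl_pySetD (ps : List Int) (ind : List Int) (i : Int) :
    (ps.foldl (fun a t => PySem.List.pySetD a t i) ind).length = ind.length := by
  induction ps generalizing ind with
  | nil => rfl
  | cons t rest ih => simp [List.foldl_cons, ih, PySem.List.length_pySetD]

theorem getD_foldl_pySetD (ps : List Int) (ind : List Int) (i : Int) (m : Nat)
    (hnn : ∀ t ∈ ps, 0 ≤ t) (hm : m < ind.length) :
    (ps.foldl (fun a t => PySem.List.pySetD a t i) ind).getD m 0 =
      if (m : Int) ∈ ps then i else ind.getD m 0 := by
  induction ps generalizing ind with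
  | nil => simp
  | cons t rest ih =>
    have ht : 0 ≤ t := hnn t (by simp)
    rw [List.foldl_cons, ih _ (fun x hx => hnn x (by simp [hx])) (by rwa [PySem.List.length_pySetD])]
    rw [PySem.List.pySetD_of_nonneg _ _ ht]
    by_cases hmem : (m : Int) ∈ rest
    · simp [hmem]
    · by_cases heq : (m : Int) = t
      · have : t.toNat = m := by omega
        simp [hmem, heq, this, List.getD_eq_getElem?_getD, List.getElem?_set, hm]
      · have : t.toNat ≠ m := by omega
        simp [hmem, heq, List.getD_eq_getElem?_getD, List.getElem?_set, this]

theorem mem_takeWhile_lt_of_pairwise {st : List Int} {i x : Int}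
    (hp : st.Pairwise (· < ·)) (hx : x ∈ st) (hxi : x < i) :
    x ∈ st.takeWhile (fun t => t < i) := by
  induction st with
  | nil => simp at hx
  | cons t rest ih =>
    rcases List.mem_cons.mp hx with rfl | hx'
    · simp [List.takeWhile_cons, hxi]
    · have ht : t < x := (List.pairwise_cons.mp hp).1 x hx'
      have : t < i := lt_trans ht hxi
      simp only [List.takeWhile_cons, this, decide_true, if_true]
      exact List.mem_cons_of_mem _ (ih (List.pairwise_cons.mp hp).2 hx')

theorem le_of_mem_dropWhile_lt {st : List Int} {i x : Int}
    (hp : st.Pairwise (· < ·)) (hx : x ∈ st.dropWhile (fun t => t < i)) : i ≤ x := by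
  induction st with
  | nil => simp at hx
  | cons t rest ih =>
    by_cases h : t < i
    · simp only [List.dropWhile_cons, h, decide_true, if_true] at hx
      exact ih (List.pairwise_cons.mp hp).2 hx
    · simp only [List.dropWhile_cons, h, decide_false, if_false] at hx
      rcases List.mem_cons.mp hx with rfl | hx'
      · omega
      · have := (List.pairwise_cons.mp hp).1 x hx'; omega

def pvRun (ind st : List Int) (q : List Int) : List Int × List Int :=
  q.foldl (fun s i => ((pvPopAssign s.1 s.2 i).1, i :: (pvPopAssign s.1 s.2 i).2)) (ind, st)

def pvAfter (q : List Int) (m : Int) : List Int := (q.dropWhile (fun x => x ≠ m)).tail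

theorem length_pvRun (q : List Int) (st ind : List Int) :
    ((pvRun ind st q).1).length = ind.length := by
  induction q generalizing ind st with
  | nil => rfl
  | cons i q' ih =>
    show ((pvRun (pvPopAssign ind st i).1 (i :: (pvPopAssign ind st i).2) q').1).length = _
    rw [ih, pvPopAssign_eq, length_foldl_pySetD]

theorem pvRun_getD (q : List Int) (st ind : List Int) (m : Nat)
    (hq : q.Nodup) (hdisj : ∀ x ∈ q, x ∉ st) (hst : st.Pairwise (· < ·))
    (hstnn : ∀ x ∈ st, 0 ≤ x) (hqnn : ∀ x ∈ q, 0 ≤ x)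
    (hstlt : ∀ x ∈ st, x < (ind.length : Int)) (hqlt : ∀ x ∈ q, x < (ind.length : Int)) :
    ((pvRun ind st q).1).getD m 0 =
      match ((if (m : Int) ∈ st then q else pvAfter q m).find? (fun i => (m : Int) < i)) with
      | some i => i
      | none => ind.getD m 0 := by
  induction q generalizing ind st with
  | nil =>
    by_cases h : (m : Int) ∈ st <;> simp [pvRun, pvAfter, h]
  | cons i q' ih =>
    have hidisj := hdisj i (by simp)
    have hnodup' := (List.nodup_cons.mp hq).2
    have hinotq' := (List.nodup_cons.mp hq).1
    -- the new state
    have hstep : pvRun ind st (i :: q') =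
        pvRun ((st.takeWhile (fun t => t < i)).foldl (fun a t => PySem.List.pySetD a t i) ind)
              (i :: st.dropWhile (fun t => t < i)) q' := by
      show pvRun (pvPopAssign ind st i).1 (i :: (pvPopAssign ind st i).2) q' = _
      rw [pvPopAssign_eq]
    set ind' := (st.takeWhile (fun t => t < i)).foldl (fun a t => PySem.List.pySetD a t i) ind with hind'
    set st' := st.dropWhile (fun t => t < i) with hst'
    have hlen' : ind'.length = ind.length := length_foldl_pySetD _ _ _
    have hsubdrop : ∀ x ∈ st', x ∈ st := fun x hx => (List.dropWhile_sublist _).mem hx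
    have hsubtake : ∀ x ∈ st.takeWhile (fun t => t < i), x ∈ st :=
      fun x hx => (List.takeWhile_sublist _).mem hx
    have hst'pw : st'.Pairwise (· < ·) := hst.sublist (List.dropWhile_sublist _)
    have hipw : (i :: st').Pairwise (· < ·) := by
      rw [List.pairwise_cons]
      refine ⟨fun x hx => ?_, hst'pw⟩
      have h1 := le_of_mem_dropWhile_lt hst hx
      have h2 : x ≠ i := fun h => hidisj (h ▸ hsubdrop x hx)
      omega
    -- ind' values at positions not in the popped prefix are unchanged
    have hind'getD : ∀ (hm' : ¬ ((m : Int) ∈ st ∧ (m : Int) < i)), ind'.getD m 0 = ind.getD m 0 := by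
      intro hm'
      by_cases hmlen : m < ind.length
      · rw [hind', getD_foldl_pySetD _ _ _ _ (fun t ht => hstnn t (hsubtake t ht)) hmlen, if_neg]
        intro hmem
        exact hm' ⟨hsubtake _ hmem, by simpa using List.mem_takeWhile_imp hmem⟩
      · have h1 : ind.length ≤ m := by omega
        rw [List.getD_eq_getElem?_getD, List.getD_eq_getElem?_getD,
          List.getElem?_eq_none (by omega), List.getElem?_eq_none h1]
    rw [hstep]
    rw [ih (i :: st') ind' hnodup'
      (fun x hx hx' => by
        rcases List.mem_cons.mp hx' with h | h
        · exact hinotq' (h ▸ hx)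
        · exact hdisj x (by simp [hx]) (hsubdrop x h))
      hipw (by
        intro x hx
        rcases List.mem_cons.mp hx with rfl | h
        · exact hqnn x (by simp)
        · exact hstnn x (hsubdrop x h))
      (fun x hx => hqnn x (by simp [hx]))
      (by
        intro x hx
        rw [hlen']
        rcases List.mem_cons.mp hx with rfl | h
        · exact hqlt x (by simp)
        · exact hstlt x (hsubdrop x h))
      (fun x hx => by rw [hlen']; exact hqlt x (by simp [hx]))]
    by_cases hmi : (m : Int) = i
    · have hmst : (m : Int) ∉ st := hmi ▸ hidisj
      rw [if_pos (by simp [hmi]), if_neg hmst]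
      have hthis : pvAfter (i :: q') (m : Int) = q' := by
        unfold pvAfter
        rw [List.dropWhile_cons, if_neg (by simp only [ne_eq, decide_eq_true_eq, Decidable.not_not]; omega)]
        rfl
      rw [hthis]
      cases hfind : q'.find? (fun j => (m : Int) < j) with
      | none => simp only [hfind]; exact hind'getD (by tauto)
      | some j => simp [hfind]
    · by_cases hmst : (m : Int) ∈ st
      · by_cases hmlt : (m : Int) < i
        · have hmst' : (m : Int) ∉ i :: st' := by
            intro hx
            rcases List.mem_cons.mp hx with h | h
            · exact hmi h
            · have := le_of_mem_dropWhile_lt hst h; omega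
          have hmq' : (m : Int) ∉ q' := fun h => hdisj _ (by simp [h]) hmst
          have hafter : pvAfter q' (m : Int) = [] := by
            have hdw : q'.dropWhile (fun x => x ≠ (m : Int)) = [] := by
              rw [List.dropWhile_eq_nil_iff]
              intro x hx
              simp only [ne_eq, decide_eq_true_eq]
              intro h; exact hmq' (h ▸ hx)
            unfold pvAfter
            rw [hdw]
            rfl
          rw [if_neg hmst', hafter]
          have hmtake : (m : Int) ∈ st.takeWhile (fun t => t < i) :=
            mem_takeWhile_lt_of_pairwise hst hmst hmlt
          have hval : ind'.getD m 0 = i := by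
            rw [hind', getD_foldl_pySetD _ _ _ _ (fun t ht => hstnn t (hsubtake t ht))
              (by have := hstlt _ hmst; omega), if_pos hmtake]
          rw [if_pos hmst, List.find?_cons_of_pos (by simpa using hmlt)]
          simpa using hval
        · have hmtw : (m : Int) ∉ st.takeWhile (fun t => t < i) := fun h =>
            hmlt (by simpa using List.mem_takeWhile_imp h)
          have hmst' : (m : Int) ∈ st' := by
            have happ := List.takeWhile_append_dropWhile (p := fun t => decide (t < i)) (l := st)
            rw [← happ, List.mem_append] at hmst
            rcases hmst with h | h
            · exact absurd h hmtw
            · exact h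
          rw [if_pos (List.mem_cons_of_mem _ hmst'), if_pos hmst,
            List.find?_cons_of_neg (by simpa using hmlt)]
          cases hfind : q'.find? (fun j => (m : Int) < j) with
          | none => simp only [hfind]; exact hind'getD (by tauto)
          | some j => simp [hfind]
      · have hmst' : (m : Int) ∉ i :: st' := by
          intro hx
          rcases List.mem_cons.mp hx with h | h
          · exact hmi h
          · exact hmst (hsubdrop _ h)
        rw [if_neg hmst', if_neg hmst]
        have hthis : pvAfter (i :: q') (m : Int) = pvAfter q' (m : Int) := by
          unfold pvAfter
          rw [List.dropWhile_cons, if_pos (by simp only [ne_eq, decide_eq_true_eq]; omega)]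
        rw [hthis]
        cases hfind : (pvAfter q' (m : Int)).find? (fun j => (m : Int) < j) with
        | none => simp only [hfind]; exact hind'getD (by tauto)
        | some j => simp [hfind]

theorem find?_min_of_pairwise {R : Int → Int → Prop} {l : List Int} {p : Int → Bool} {j : Int}
    (hp : l.Pairwise R) (h : l.find? p = some j) :
    ∀ x ∈ l, p x → x = j ∨ R j x := by
  induction l with
  | nil => simp at h
  | cons t rest ih =>
    intro x hx hpx
    by_cases hpt : p t
    · rw [List.find?_cons_of_pos hpt] at h
      obtain rfl := Option.some_injective _ h
      rcases List.mem_cons.mp hx with rfl | hx'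
      · exact Or.inl rfl
      · exact Or.inr ((List.pairwise_cons.mp hp).1 x hx')
    · rw [List.find?_cons_of_neg (by simpa using hpt)] at h
      rcases List.mem_cons.mp hx with rfl | hx'
      · exact absurd hpx (by simpa using hpt)
      · exact ih (List.pairwise_cons.mp hp).2 h x hx' hpx

theorem pvAfter_append (qa qb : List Int) (m : Int) (h : m ∉ qa) :
    pvAfter (qa ++ m :: qb) m = qb := by
  induction qa with
  | nil =>
    unfold pvAfter
    rw [List.nil_append, List.dropWhile_cons, if_neg (by simp)]
    rfl
  | cons a qa' ih =>
    unfold pvAfter at ih ⊢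
    rw [List.cons_append, List.dropWhile_cons,
      if_pos (by simp only [ne_eq, decide_eq_true_eq]; intro hh; exact h (by simp [hh]))]
    exact ih (fun hh => h (List.mem_cons_of_mem _ hh))

theorem sorted2_eq_sorted_lex (xs : List (Int × Int)) :
    PySem.List.sorted2 xs (fun q => q.1) (fun q => q.2) false =
    PySem.List.sorted xs (fun q => toLex q) false := by
  rw [PySem.List.sorted_eq_foldl_insertBy]
  unfold PySem.List.sorted2
  have hfg : (fun (a b : Int × Int) => (decide (a.1 < b.1) || (!decide (b.1 < a.1) && decide (a.2 < b.2))))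
      = (fun (a b : Int × Int) => decide (toLex a < toLex b)) := by
    funext a b
    by_cases h1 : a.1 < b.1 <;> by_cases h2 : b.1 < a.1 <;> by_cases h3 : a.2 < b.2 <;>
      simp [h1, h2, h3, Prod.Lex.toLex_lt_toLex] <;> omega
  simp only [Bool.false_eq_true, if_false, hfg]

def pvQ (arr : List Int) : List Int :=
  (PySem.List.sorted ((PySem.List.enumerate arr).map (fun p => (-p.2, p.1)))
    (fun q => toLex q) false).map (fun p => p.2)

theorem A_eq_run (arr : List Int) :
    calculateGreatestSmallerOrEqualToIndices arr =
      (pvRun (List.replicate arr.length (-1)) [] (pvQ arr)).1 := by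
  unfold calculateGreatestSmallerOrEqualToIndices pvRun pvQ
  rw [sorted2_eq_sorted_lex, List.foldl_map]

theorem mem_enumerate_shape (xs : List Int) (s : Int) :
    ∀ p ∈ PySem.List.enumerate xs s,
      s ≤ p.1 ∧ p.1 < s + xs.length ∧ p.2 = xs.getD (p.1 - s).toNat 0 := by
  induction xs generalizing s with
  | nil => simp [PySem.List.enumerate_nil]
  | cons x rest ih =>
    intro p hp
    rw [PySem.List.enumerate_cons] at hp
    rcases List.mem_cons.mp hp with rfl | hp'
    · simp
    · obtain ⟨h1, h2, h3⟩ := ih (s + 1) p hp'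
      refine ⟨by omega, by simp; omega, ?_⟩
      have h4 : (p.1 - s).toNat = (p.1 - (s + 1)).toNat + 1 := by omega
      rw [h4]
      simpa using h3

theorem pvQ_perm (arr : List Int) : (pvQ arr).Perm (PySem.List.pyRange 0 arr.length 1) := by
  unfold pvQ
  have h1 := (PySem.List.sorted_perm ((PySem.List.enumerate arr).map (fun p => (-p.2, p.1)))
    (fun q => toLex q) false).map (fun p => p.2)
  have h2 : ((PySem.List.enumerate arr).map (fun p : Int × Int => (-p.2, p.1))).map (fun p : Int × Int => p.2)
      = PySem.List.pyRange 0 arr.length 1 := by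
    rw [List.map_map]
    have := PySem.List.map_fst_enumerate arr 0
    simpa using this
  rw [h2] at h1
  exact h1

theorem pvQ_mem (arr : List Int) (x : Int) : x ∈ pvQ arr ↔ 0 ≤ x ∧ x < arr.length := by
  rw [(pvQ_perm arr).mem_iff, PySem.List.mem_pyRange_one]

theorem pvQ_nodup (arr : List Int) : (pvQ arr).Nodup :=
  ((pvQ_perm arr).nodup_iff).mpr (PySem.List.nodup_pyRange_one 0 arr.length)

-- each element of the sorted pair list is the key pair of its index

theorem temp_shape (arr : List Int) :
    ∀ p ∈ PySem.List.sorted ((PySem.List.enumerate arr).map (fun p => (-p.2, p.1)))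
        (fun q => toLex q) false,
      0 ≤ p.2 ∧ p.2 < (arr.length : Int) ∧ p.1 = -(pvAv arr p.2) := by
  intro p hp
  have hp' : p ∈ (PySem.List.enumerate arr).map (fun p : Int × Int => (-p.2, p.1)) :=
    (PySem.List.sorted_perm _ _ _).mem_iff.mp hp
  obtain ⟨e, he, rfl⟩ := List.mem_map.mp hp'
  obtain ⟨h1, h2, h3⟩ := mem_enumerate_shape arr 0 e he
  refine ⟨h1, by simpa using h2, ?_⟩
  simp only [pvAv]
  rw [h3]
  simp

theorem pvQ_pairwise (arr : List Int) : (pvQ arr).Pairwise (pvLt arr) := by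
  unfold pvQ
  rw [List.pairwise_map]
  have hle := PySem.List.sorted_pairwise ((PySem.List.enumerate arr).map (fun p => (-p.2, p.1)))
    (fun q : Int × Int => toLex q)
  have hnd : (PySem.List.sorted ((PySem.List.enumerate arr).map (fun p => (-p.2, p.1)))
      (fun q => toLex q) false).Nodup := by
    have h := pvQ_nodup arr
    unfold pvQ at h
    exact List.Nodup.of_map _ h
  have hcomb := List.Pairwise.and hle hnd
  refine List.Pairwise.imp_of_mem ?_ hcomb
  intro a b ha hb hab
  obtain ⟨hle', hne⟩ := hab
  have hlt : toLex a < toLex b := lt_of_le_of_ne hle' (by simpa using hne)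
  rw [Prod.Lex.toLex_lt_toLex] at hlt
  obtain ⟨_, _, ha3⟩ := temp_shape arr a ha
  obtain ⟨_, _, hb3⟩ := temp_shape arr b hb
  rcases hlt with h | ⟨h1, h2⟩
  · exact Or.inl (by rw [ha3, hb3] at h; omega)
  · exact Or.inr ⟨by rw [ha3, hb3] at h1; omega, h2⟩

theorem A_length (arr : List Int) :
    (calculateGreatestSmallerOrEqualToIndices arr).length = arr.length := by
  rw [A_eq_run, length_pvRun, List.length_replicate]

theorem A_pick (arr : List Int) (m : Nat) (hm : m < arr.length) :
    pvIsPick arr m ((calculateGreatestSmallerOrEqualToIndices arr).getD m 0) := by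
  have hmq : (m : Int) ∈ pvQ arr := (pvQ_mem arr m).mpr ⟨by omega, by exact_mod_cast hm⟩
  obtain ⟨qa, qb, hsplit⟩ := List.append_of_mem hmq
  have hnd := pvQ_nodup arr
  rw [hsplit, List.nodup_append] at hnd
  have hnotqa : (m : Int) ∉ qa := fun h => hnd.2.2 _ h _ (by simp) rfl
  have hqpw := pvQ_pairwise arr
  rw [hsplit] at hqpw
  obtain ⟨hpwqa, hpwmid, hcross0⟩ := List.pairwise_append.mp hqpw
  obtain ⟨hcross, hpwqb⟩ := List.pairwise_cons.mp hpwmid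
  have hqa : ∀ a ∈ qa, pvLt arr a m := fun a ha => hcross0 a ha _ (by simp)
  -- candidates are exactly the elements of qb greater than m
  have hcand_mem : ∀ j, pvCand arr (m : Int) j → j ∈ qb := by
    intro j hj
    obtain ⟨hj1, hj2, hj3⟩ := hj
    have hjq : j ∈ pvQ arr := (pvQ_mem arr j).mpr ⟨by omega, hj2⟩
    rw [hsplit] at hjq
    rcases List.mem_append.mp hjq with h | h
    · have := hqa j h
      rcases this with h' | ⟨h', h''⟩ <;> omega
    · rcases List.mem_cons.mp h with h' | h'
      · omega
      · exact h'
  have hmem_cand : ∀ j ∈ qb, (m : Int) < j → pvCand arr (m : Int) j := by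
    intro j hj hlt
    have hjq : j ∈ pvQ arr := by rw [hsplit]; simp [hj]
    refine ⟨hlt, ((pvQ_mem arr j).mp hjq).2, ?_⟩
    rcases hcross j hj with h | ⟨h, _⟩ <;> omega
  -- evaluate A via the machine invariant
  rw [A_eq_run, pvRun_getD _ _ _ _ (pvQ_nodup arr) (by simp) List.Pairwise.nil (by simp)
    (fun x hx => ((pvQ_mem arr x).mp hx).1)
    (by simp) (fun x hx => by rw [List.length_replicate]; exact ((pvQ_mem arr x).mp hx).2)]
  rw [if_neg (by simp), hsplit, pvAfter_append _ _ _ hnotqa]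
  cases hfind : qb.find? (fun j => (m : Int) < j) with
  | none =>
    simp only [hfind]
    left
    refine ⟨List.getD_replicate _ hm, ?_⟩
    intro j hj
    have hjqb := hcand_mem j hj
    have h2 := List.find?_eq_none.mp hfind j hjqb
    simp only [decide_eq_true_eq] at h2
    exact h2 hj.1
  | some j =>
    simp only [hfind]
    right
    have hjqb := List.mem_of_find?_eq_some hfind
    have hjlt : (m : Int) < j := by simpa using List.find?_some hfind
    refine ⟨hmem_cand j hjqb hjlt, ?_⟩
    intro x hx
    exact find?_min_of_pairwise hpwqb hfind x (hcand_mem x hx) (by simp [hx.1])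

theorem pvAv_pyGetD (arr : List Int) (j : Int) (h0 : 0 ≤ j) (h1 : j < arr.length) :
    PySem.List.pyGetD arr j 0 = pvAv arr j := by
  rw [PySem.List.pyGetD_eq_getElem arr 0 h0 h1, pvAv,
    List.getD_eq_getElem arr 0 (by omega)]

theorem B_length (arr : List Int) :
    (calculateGreatestSmallerOrEqualToIndices_alt arr).length = arr.length := by
  simp [calculateGreatestSmallerOrEqualToIndices_alt, PySem.List.length_pyRange_one]

theorem B_inner_spec (arr : List Int) (k : Int) (hk0 : 0 ≤ k) (hkn : k < (arr.length : Int))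
    (L : List Int) (hmem : ∀ j ∈ L, k < j ∧ j < (arr.length : Int))
    (hpw : L.Pairwise (· < ·)) :
    (L.foldl (fun best j =>
      if PySem.List.pyGetD arr j 0 ≤ PySem.List.pyGetD arr k 0 ∧
          (best = -1 ∨ PySem.List.pyGetD arr best 0 < PySem.List.pyGetD arr j 0)
        then j else best) (-1) = -1 ∧ ∀ j ∈ L, ¬ pvAv arr j ≤ pvAv arr k) ∨
    (∃ v, L.foldl (fun best j =>
      if PySem.List.pyGetD arr j 0 ≤ PySem.List.pyGetD arr k 0 ∧
          (best = -1 ∨ PySem.List.pyGetD arr best 0 < PySem.List.pyGetD arr j 0)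
        then j else best) (-1) = v ∧ v ∈ L ∧ pvAv arr v ≤ pvAv arr k ∧
        ∀ j ∈ L, pvAv arr j ≤ pvAv arr k → j = v ∨ pvLt arr v j) := by
  induction L using List.reverseRecOn with
  | nil => left; simp
  | append_singleton L' b ih =>
    obtain ⟨hbk, hbn⟩ := hmem b (by simp)
    have hb0 : 0 ≤ b := by omega
    obtain ⟨hpwL', _, hcross⟩ := List.pairwise_append.mp hpw
    have hless : ∀ j ∈ L', j < b := fun j hj => hcross j hj b (by simp)
    have hmem' : ∀ j ∈ L', k < j ∧ j < (arr.length : Int) := fun j hj => hmem j (by simp [hj])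
    rw [List.foldl_append, List.foldl_cons, List.foldl_nil]
    have hgb := pvAv_pyGetD arr b hb0 hbn
    have hgk := pvAv_pyGetD arr k hk0 hkn
    rcases ih hmem' hpwL' with ⟨h1, h2⟩ | ⟨v, hv0, hv1, hv2, hv3⟩
    · rw [h1]
      by_cases hc : pvAv arr b ≤ pvAv arr k
      · rw [if_pos ⟨by rw [hgb, hgk]; exact hc, Or.inl rfl⟩]
        right
        refine ⟨b, rfl, by simp, hc, ?_⟩
        intro j hj hjav
        rcases List.mem_append.mp hj with h | h
        · exact absurd hjav (h2 j h)
        · simp at h; omega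
      · rw [if_neg (fun hcc => hc (by rw [hgb, hgk] at hcc; exact hcc.1))]
        left
        refine ⟨rfl, ?_⟩
        intro j hj
        rcases List.mem_append.mp hj with h | h
        · exact h2 j h
        · simp at h; subst h; exact hc
    · rw [hv0]
      obtain ⟨hkv, hvn⟩ := hmem' v hv1
      have hv0' : 0 ≤ v := by omega
      have hvne : v ≠ -1 := by omega
      have hvb : v < b := hless v hv1
      have hgv := pvAv_pyGetD arr v hv0' hvn
      by_cases hc1 : pvAv arr b ≤ pvAv arr k
      · by_cases hc2 : pvAv arr v < pvAv arr b
        · rw [if_pos ⟨by rw [hgb, hgk]; exact hc1, Or.inr (by rw [hgb, hgv]; exact hc2)⟩]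
          right
          refine ⟨b, rfl, by simp, hc1, ?_⟩
          intro j hj hjav
          rcases List.mem_append.mp hj with h | h
          · rcases hv3 j h hjav with rfl | hlt
            · exact Or.inr (Or.inl hc2)
            · rcases hlt with hlt | ⟨hlt1, hlt2⟩
              · exact Or.inr (Or.inl (by omega))
              · exact Or.inr (Or.inl (by omega))
          · simp at h; omega
        · rw [if_neg (fun hcc => by
            rw [hgb, hgv] at hcc
            rcases hcc.2 with h | h
            · exact hvne h
            · exact hc2 h)]
          right
          refine ⟨v, rfl, by simp [hv1], hv2, ?_⟩
          intro j hj hjav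
          rcases List.mem_append.mp hj with h | h
          · exact hv3 j h hjav
          · simp at h; subst h
            by_cases he : pvAv arr v = pvAv arr j
            · exact Or.inr (Or.inr ⟨he, hvb⟩)
            · exact Or.inr (Or.inl (by omega))
      · rw [if_neg (fun hcc => hc1 (by rw [hgb, hgk] at hcc; exact hcc.1))]
        right
        refine ⟨v, rfl, by simp [hv1], hv2, ?_⟩
        intro j hj hjav
        rcases List.mem_append.mp hj with h | h
        · exact hv3 j h hjav
        · simp at h; subst h; exact absurd hjav hc1

theorem B_pick (arr : List Int) (m : Nat) (hm : m < arr.length) :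
    pvIsPick arr m ((calculateGreatestSmallerOrEqualToIndices_alt arr).getD m 0) := by
  have hlen : m < (calculateGreatestSmallerOrEqualToIndices_alt arr).length := by
    rw [B_length]; exact hm
  have hB : (calculateGreatestSmallerOrEqualToIndices_alt arr).getD m 0 =
      (PySem.List.pyRange ((m : Int) + 1) (arr.length : Int) 1).foldl (fun best j =>
        if PySem.List.pyGetD arr j 0 ≤ PySem.List.pyGetD arr (m : Int) 0 ∧
            (best = -1 ∨ PySem.List.pyGetD arr best 0 < PySem.List.pyGetD arr j 0)
          then j else best) (-1) := by
    rw [List.getD_eq_getElem _ 0 hlen]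
    simp only [calculateGreatestSmallerOrEqualToIndices_alt, List.getElem_map]
    rw [PySem.List.getElem_pyRange_one]
    norm_num
  rw [hB]
  have hspec := B_inner_spec arr (m : Int) (by omega) (by exact_mod_cast hm)
    (PySem.List.pyRange ((m : Int) + 1) (arr.length : Int) 1)
    (fun j hj => by rw [PySem.List.mem_pyRange_one] at hj; omega)
    (PySem.List.pairwise_lt_pyRange_one _ _)
  rcases hspec with ⟨h1, h2⟩ | ⟨v, hv0, hv1, hv2, hv3⟩
  · rw [h1]
    left
    refine ⟨rfl, ?_⟩
    intro j hj
    obtain ⟨hj1, hj2, hj3⟩ := hj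
    exact h2 j (by rw [PySem.List.mem_pyRange_one]; omega) hj3
  · rw [hv0]
    right
    rw [PySem.List.mem_pyRange_one] at hv1
    refine ⟨⟨by omega, by omega, hv2⟩, ?_⟩
    intro j hj
    obtain ⟨hj1, hj2, hj3⟩ := hj
    exact hv3 j (by rw [PySem.List.mem_pyRange_one]; omega) hj3

-- ===== VERDICT (by name: the statement is the Claim_ definition above) =====
theorem calculateGreatestSmallerOrEqualToIndices_spec : Claim_equal_calculateGreatestSmallerOrEqualToIndices := by
  intro arr _
  show calculateGreatestSmallerOrEqualToIndices arr = calculateGreatestSmallerOrEqualToIndices_alt arr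
  apply List.ext_getElem
  · rw [A_length, B_length]
  · intro m h1 h2
    have hm : m < arr.length := by rw [A_length] at h1; exact h1
    have := pvIsPick_unique (A_pick arr m hm) (B_pick arr m hm)
    rw [← List.getD_eq_getElem _ 0, ← List.getD_eq_getElem _ 0]
    exact this
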